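-- pv_equiv track=rewrite | github.com/taesookim0412/PythonAlgorithms | 2020/07/GoogleAssessmentQuestions/04E_NumberOfSubsets.py | numberOfSubsetsn2
-- ===== SOURCE A (Python) =====
-- def numberOfSubsetsn2(nums, k):
--     nums.sort()
--     ct = 0
--     for i in range(len(nums)):
--         for j in range(i, len(nums)):
--             if nums[i] + nums[j] > k:
--                 break
--             if nums[i] + nums[j] <= k:
--                 ct += 2**(j-1-i if j > i else 0)
--     return ct
-- ===== SOURCE B (Python) =====
-- def numberOfSubsetsn2(nums, k):
--     # Sort, then for each i binary-search the largest J with nums[i]+nums[J] <= k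
--     # and add 2^(J-i) in one shot (closed-form geometric sum of A's inner loop).
--     nums.sort()
--     n = len(nums)
--     total = 0
--     for i in range(n):
--         x = nums[i]
--         if x + x > k:
--             break
--         lo, hi = i, n
--         while hi - lo > 1:
--             mid = (lo + hi) // 2
--             if x + nums[mid] <= k:
--                 lo = mid
--             else:
--                 hi = mid
--         total += 1 << (lo - i)
--     return total
-- ===== Notes on version B (the rewrite author's own statement) =====
-- stated objective: faster
-- what changed: Replaces A's quadratic inner scan (adding 2^(j-1-i) term by term until the break) with a binary search for the largest J with nums[i]+nums[J] <= k plus the closed-form geometric sum 2^(J-i), and breaks the outer loop as soon as 2*nums[i] > k.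
import Mathlib
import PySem

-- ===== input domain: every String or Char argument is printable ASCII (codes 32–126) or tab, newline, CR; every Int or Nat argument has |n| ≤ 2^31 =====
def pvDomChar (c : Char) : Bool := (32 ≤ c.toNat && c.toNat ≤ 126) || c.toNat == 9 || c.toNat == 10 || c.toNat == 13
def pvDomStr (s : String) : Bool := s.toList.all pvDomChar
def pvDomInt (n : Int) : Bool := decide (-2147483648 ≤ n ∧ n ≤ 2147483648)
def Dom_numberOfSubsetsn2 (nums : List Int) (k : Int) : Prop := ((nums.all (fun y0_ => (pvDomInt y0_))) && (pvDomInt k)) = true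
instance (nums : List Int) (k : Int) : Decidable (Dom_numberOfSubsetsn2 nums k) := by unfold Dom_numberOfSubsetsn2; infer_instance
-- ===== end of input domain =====

-- B replaces A's quadratic inner scan by a binary search plus the closed-form
-- geometric sum 2^(J-i) (objective: faster). Both A and B sort `nums` in place
-- (same observable mutation); the equivalence proved here is about the return value.

-- ===== PORT A =====
-- inner loop: for j in range(i, len(nums)) with break
def pvInnerA (s : List Int) (k : Int) (i j : Nat) (ct : Int) : Int :=
  if j < s.length then
    if s.getD i 0 + s.getD j 0 > k then ct
    else
      pvInnerA s k i (j+1)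
        (if s.getD i 0 + s.getD j 0 ≤ k then
           ct + 2 ^ (if i < j then j - 1 - i else 0) else ct)
  else ct
termination_by s.length - j

-- outer loop: for i in range(len(nums))
def pvOuterA (s : List Int) (k : Int) (i : Nat) (ct : Int) : Int :=
  if i < s.length then pvOuterA s k (i+1) (pvInnerA s k i i ct) else ct
termination_by s.length - i

def numberOfSubsetsn2 (nums : List Int) (k : Int) : Int :=
  pvOuterA (PySem.List.sorted nums (fun x => x) false) k 0 0

-- ===== PORT B =====
-- while hi - lo > 1: mid = (lo+hi)//2; keep lo with x+nums[lo] <= k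
def pvBSearch (s : List Int) (k x : Int) (lo hi : Nat) : Nat :=
  if hi - lo > 1 then
    let mid := (lo + hi) / 2
    if x + s.getD mid 0 ≤ k then pvBSearch s k x mid hi else pvBSearch s k x lo mid
  else lo
termination_by hi - lo
decreasing_by all_goals omega

-- for i in range(n) with break when x + x > k
def pvOuterB (s : List Int) (k : Int) (i : Nat) (tot : Int) : Int :=
  if i < s.length then
    if s.getD i 0 + s.getD i 0 > k then tot
    else pvOuterB s k (i+1) (tot + 2 ^ (pvBSearch s k (s.getD i 0) i s.length - i))
  else tot
termination_by s.length - i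

def numberOfSubsetsn2_alt (nums : List Int) (k : Int) : Int :=
  pvOuterB (PySem.List.sorted nums (fun x => x) false) k 0 0

-- ===== PRECONDITION & SPEC =====
def Spec_numberOfSubsetsn2 (nums : List Int) (k : Int) (out : Int) : Prop := out = numberOfSubsetsn2_alt nums k
instance (nums : List Int) (k : Int) (out : Int) : Decidable (Spec_numberOfSubsetsn2 nums k out) := by unfold Spec_numberOfSubsetsn2; infer_instance

-- ===== CLAIM (what is proved, stated in full; the proofs are below) =====
def Claim_equal_numberOfSubsetsn2 : Prop := ∀ (nums : List Int) (k : Int), Dom_numberOfSubsetsn2 nums k → Spec_numberOfSubsetsn2 nums k (numberOfSubsetsn2 nums k)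

-- ===== LEMMAS AND PROOFS =====

-- proof-only helper: length of the run of consecutive j ≥ j0 with x + s[j] ≤ k
def pvRun (s : List Int) (k x : Int) (j : Nat) : Nat :=
  if j < s.length then
    if x + s.getD j 0 ≤ k then pvRun s k x (j+1) + 1 else 0
  else 0
termination_by s.length - j

lemma pvInnerA_closed (s : List Int) (k : Int) (i : Nat) :
    ∀ j ct, i < j →
      pvInnerA s k i j ct
        = ct + 2 ^ (j - 1 - i) * (2 ^ (pvRun s k (s.getD i 0) j) - 1) := by
  suffices H : ∀ m j ct, s.length - j ≤ m → i < j →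
      pvInnerA s k i j ct
        = ct + 2 ^ (j - 1 - i) * (2 ^ (pvRun s k (s.getD i 0) j) - 1) by
    intro j ct hij; exact H (s.length - j) j ct le_rfl hij
  intro m
  induction m with
  | zero =>
    intro j ct hm hij
    have hj : ¬ j < s.length := by omega
    rw [pvInnerA, pvRun]
    simp [hj]
  | succ m ih =>
    intro j ct hm hij
    rw [pvInnerA, pvRun]
    by_cases hj : j < s.length
    · rw [if_pos hj, if_pos hj]
      by_cases hc : s.getD i 0 + s.getD j 0 > k
      · have hnle : ¬ (s.getD i 0 + s.getD j 0 ≤ k) := by omega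
        rw [if_pos hc, if_neg hnle]
        ring
      · have hle : s.getD i 0 + s.getD j 0 ≤ k := by omega
        rw [if_neg hc, if_pos hle, if_pos hle, if_pos hij]
        rw [ih (j+1) _ (by omega) (by omega)]
        have he : j + 1 - 1 - i = (j - 1 - i) + 1 := by omega
        rw [he, pow_succ]
        ring
    · simp [hj]

lemma pvInnerA_start (s : List Int) (k : Int) (i : Nat) (ct : Int) (hi : i < s.length) :
    pvInnerA s k i i ct
      = ct + (if s.getD i 0 + s.getD i 0 ≤ k
              then 2 ^ (pvRun s k (s.getD i 0) (i+1)) else 0) := by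
  rw [pvInnerA]
  rw [if_pos hi]
  by_cases hc : s.getD i 0 + s.getD i 0 > k
  · have hnle : ¬ (s.getD i 0 + s.getD i 0 ≤ k) := by omega
    rw [if_pos hc, if_neg hnle, add_zero]
  · have hle : s.getD i 0 + s.getD i 0 ≤ k := by omega
    rw [if_neg hc, if_pos hle, if_pos hle, if_neg (lt_irrefl i)]
    rw [pvInnerA_closed s k i (i+1) _ (by omega)]
    have he : i + 1 - 1 - i = 0 := by omega
    rw [he]
    ring

lemma pvRun_char (s : List Int) (k x : Int) :
    ∀ j e, j ≤ e → e ≤ s.length →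
      (∀ t, j ≤ t → t < e → x + s.getD t 0 ≤ k) →
      (e < s.length → ¬ (x + s.getD e 0 ≤ k)) →
      pvRun s k x j = e - j := by
  suffices H : ∀ m j e, e - j ≤ m → j ≤ e → e ≤ s.length →
      (∀ t, j ≤ t → t < e → x + s.getD t 0 ≤ k) →
      (e < s.length → ¬ (x + s.getD e 0 ≤ k)) → pvRun s k x j = e - j by
    intro j e h1 h2 h3 h4; exact H (e - j) j e le_rfl h1 h2 h3 h4
  intro m
  induction m with
  | zero =>
    intro j e hm hje hen hall hend
    have hej : j = e := by omega
    subst hej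
    rw [pvRun]
    by_cases hj : j < s.length
    · rw [if_pos hj, if_neg (hend hj)]
      omega
    · rw [if_neg hj]
      omega
  | succ m ih =>
    intro j e hm hje hen hall hend
    by_cases hej : j = e
    · subst hej
      rw [pvRun]
      by_cases hj : j < s.length
      · rw [if_pos hj, if_neg (hend hj)]
        omega
      · rw [if_neg hj]
        omega
    · have hjlt : j < e := by omega
      have hj : j < s.length := by omega
      have hcond : x + s.getD j 0 ≤ k := hall j le_rfl hjlt
      rw [pvRun]
      simp only [hj, hcond, if_pos]
      have := ih (j+1) e (by omega) (by omega) hen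
        (fun t ht1 ht2 => hall t (by omega) ht2) hend
      omega

lemma pvBSearch_spec (s : List Int) (k x : Int)
    (hmono : ∀ p q, p ≤ q → q < s.length → s.getD p 0 ≤ s.getD q 0) :
    ∀ lo hi, lo < hi → hi ≤ s.length →
      x + s.getD lo 0 ≤ k →
      (∀ t, hi ≤ t → t < s.length → ¬ (x + s.getD t 0 ≤ k)) →
      lo ≤ pvBSearch s k x lo hi ∧ pvBSearch s k x lo hi < hi ∧
      x + s.getD (pvBSearch s k x lo hi) 0 ≤ k ∧
      (∀ t, pvBSearch s k x lo hi < t → t < s.length → ¬ (x + s.getD t 0 ≤ k)) := by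
  suffices H : ∀ m lo hi, hi - lo ≤ m → lo < hi → hi ≤ s.length →
      x + s.getD lo 0 ≤ k →
      (∀ t, hi ≤ t → t < s.length → ¬ (x + s.getD t 0 ≤ k)) →
      lo ≤ pvBSearch s k x lo hi ∧ pvBSearch s k x lo hi < hi ∧
      x + s.getD (pvBSearch s k x lo hi) 0 ≤ k ∧
      (∀ t, pvBSearch s k x lo hi < t → t < s.length → ¬ (x + s.getD t 0 ≤ k)) by
    intro lo hi h1 h2 h3 h4; exact H (hi - lo) lo hi le_rfl h1 h2 h3 h4
  intro m
  induction m with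
  | zero => intro lo hi hm hlh hhn hlo hhi; omega
  | succ m ih =>
    intro lo hi hm hlh hhn hlo hhi
    rw [pvBSearch]
    by_cases hgt : hi - lo > 1
    · simp only [hgt, if_true]
      have h1 : lo < (lo + hi) / 2 := by omega
      have h2 : (lo + hi) / 2 < hi := by omega
      by_cases hc : x + s.getD ((lo + hi) / 2) 0 ≤ k
      · simp only [if_pos hc]
        obtain ⟨a, b, c, d⟩ := ih ((lo + hi) / 2) hi (by omega) (by omega) hhn hc hhi
        exact ⟨by omega, b, c, d⟩
      · simp only [if_neg hc]
        have hhi' : ∀ t, (lo + hi) / 2 ≤ t → t < s.length → ¬ (x + s.getD t 0 ≤ k) := by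
          intro t ht htn hle
          exact hc (by have := hmono ((lo + hi) / 2) t ht htn; omega)
        obtain ⟨a, b, c, d⟩ := ih lo ((lo + hi) / 2) (by omega) (by omega) (by omega) hlo hhi'
        exact ⟨a, by omega, c, d⟩
    · simp only [hgt, if_false]
      refine ⟨le_rfl, by omega, hlo, ?_⟩
      intro t ht htn
      exact hhi t (by omega) htn

lemma pvOuterA_zero (s : List Int) (k : Int) :
    ∀ i ct, (∀ t, i ≤ t → t < s.length → k < s.getD t 0 + s.getD t 0) →
      pvOuterA s k i ct = ct := by
  suffices H : ∀ m i ct, s.length - i ≤ m →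
      (∀ t, i ≤ t → t < s.length → k < s.getD t 0 + s.getD t 0) →
      pvOuterA s k i ct = ct by
    intro i ct hall; exact H (s.length - i) i ct le_rfl hall
  intro m
  induction m with
  | zero =>
    intro i ct hm hall
    rw [pvOuterA]
    simp [show ¬ i < s.length by omega]
  | succ m ih =>
    intro i ct hm hall
    rw [pvOuterA]
    by_cases hi : i < s.length
    · simp only [hi, if_true]
      have hx := hall i le_rfl hi
      rw [pvInnerA_start s k i ct hi, if_neg (by omega), add_zero]
      exact ih (i+1) ct (by omega) (fun t ht htn => hall t (by omega) htn)
    · simp [hi]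

lemma pvOuter_eq (s : List Int) (k : Int)
    (hmono : ∀ p q, p ≤ q → q < s.length → s.getD p 0 ≤ s.getD q 0) :
    ∀ i ct, pvOuterA s k i ct = pvOuterB s k i ct := by
  suffices H : ∀ m i ct, s.length - i ≤ m → pvOuterA s k i ct = pvOuterB s k i ct by
    intro i ct; exact H (s.length - i) i ct le_rfl
  intro m
  induction m with
  | zero =>
    intro i ct hm
    rw [pvOuterA, pvOuterB]
    simp [show ¬ i < s.length by omega]
  | succ m ih =>
    intro i ct hm
    rw [pvOuterA, pvOuterB]
    by_cases hi : i < s.length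
    · simp only [hi, if_true]
      by_cases hbr : s.getD i 0 + s.getD i 0 > k
      · simp only [if_pos hbr]
        rw [pvInnerA_start s k i ct hi, if_neg (by omega), add_zero]
        exact pvOuterA_zero s k (i+1) ct
          (fun t ht htn => by have := hmono i t (by omega) htn; omega)
      · have hle : s.getD i 0 + s.getD i 0 ≤ k := by omega
        simp only [if_neg hbr]
        rw [pvInnerA_start s k i ct hi, if_pos hle]
        obtain ⟨hL1, hL2, hL3, hL4⟩ := pvBSearch_spec s k (s.getD i 0) hmono i s.length
          hi le_rfl hle (fun t ht htn => absurd htn (by omega))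
        have hrun : pvRun s k (s.getD i 0) (i+1)
            = (pvBSearch s k (s.getD i 0) i s.length + 1) - (i+1) := by
          apply pvRun_char s k (s.getD i 0) (i+1) _ (by omega) (by omega)
          · intro t ht1 ht2
            have := hmono t (pvBSearch s k (s.getD i 0) i s.length) (by omega) hL2
            omega
          · intro hLn hcon
            exact hL4 _ (by omega) hLn hcon
        rw [hrun]
        have he : (pvBSearch s k (s.getD i 0) i s.length + 1) - (i+1)
            = pvBSearch s k (s.getD i 0) i s.length - i := by omega
        rw [he]
        exact ih (i+1) _ (by omega)
    · simp [hi]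

lemma sorted_getD_mono (nums : List Int) :
    ∀ p q, p ≤ q → q < (PySem.List.sorted nums (fun x => x) false).length →
      (PySem.List.sorted nums (fun x => x) false).getD p 0
        ≤ (PySem.List.sorted nums (fun x => x) false).getD q 0 := by
  intro p q hpq hq
  have hp : p < (PySem.List.sorted nums (fun x => x) false).length := by omega
  rw [List.getD_eq_getElem _ _ hp, List.getD_eq_getElem _ _ hq]
  exact PySem.List.sorted_id_getElem_mono nums hpq hq

-- ===== VERDICT (by name: the statement is the Claim_ definition above) =====
theorem numberOfSubsetsn2_spec : Claim_equal_numberOfSubsetsn2 := by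
  intro nums k _
  unfold Spec_numberOfSubsetsn2 numberOfSubsetsn2 numberOfSubsetsn2_alt
  exact pvOuter_eq _ k (sorted_getD_mono nums) 0 0
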